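-- pv_equiv track=rewrite | github.com/piotex/python_youtube | youtube_watcher/tmp.py | get_random_video_id
-- ===== SOURCE A (Python) =====
-- def get_random_video_id(max_id: int):
--     # max = 10
--     # 10 - 7    x8
--     # 6 - 3     x6
--     # 2 - 1     x4
--
--     start_id = max_id
--     end_id = start_id-4
--
--     result_list = []
--     multiplier = 8
--
--     while end_id > 0:
--         for id in range(start_id, end_id, -1):
--             for j in range(0,multiplier,1):
--                 result_list.append(id)
--
--         if multiplier > 2:
--             multiplier -= 2
--
--         start_id -= 4
--         end_id = start_id-4
--
--     if start_id > 0: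
--         for id in range(start_id, 0, -1):
--             for j in range(0,multiplier,1):
--                 result_list.append(id)
--     return result_list
-- ===== SOURCE B (Python) =====
-- def get_random_video_id(max_id: int):
--     result_list = []
--     for id in range(max_id, 0, -1):
--         block = (max_id - id) // 4
--         result_list.extend([id] * max(8 - 2 * block, 2))
--     return result_list
-- ===== Notes on version B (the rewrite author's own statement) =====
-- stated objective: simpler
-- what changed: Replaced the while-loop over 4-id blocks with mutable start_id/end_id/multiplier state plus a separate tail loop by a single flat pass over range(max_id,0,-1) that derives each id's multiplier in closed form as max(8 - 2*((max_id-id)//4), 2).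
import Mathlib
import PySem

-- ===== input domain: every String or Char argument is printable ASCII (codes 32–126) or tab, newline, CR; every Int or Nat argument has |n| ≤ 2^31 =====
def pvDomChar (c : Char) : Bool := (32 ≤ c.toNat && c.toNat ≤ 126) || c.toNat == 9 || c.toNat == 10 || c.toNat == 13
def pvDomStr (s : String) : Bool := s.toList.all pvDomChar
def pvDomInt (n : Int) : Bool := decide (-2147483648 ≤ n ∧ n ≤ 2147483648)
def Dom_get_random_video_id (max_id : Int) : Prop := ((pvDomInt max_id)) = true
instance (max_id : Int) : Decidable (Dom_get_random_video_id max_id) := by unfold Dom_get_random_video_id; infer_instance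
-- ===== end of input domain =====

-- B replaces A's while-loop with mutable start/end/multiplier state (plus a separate
-- tail loop) by one flat pass deriving each id's multiplier in closed form; simpler.

-- ===== PORT A =====
-- the doubly nested 'for id in range(s, e, -1): for j in range(0, mult, 1): append(id)'
def pvBlockA (s e mult : Int) (acc : List Int) : List Int :=
  (PySem.List.pyRange s e (-1)).foldl
    (fun acc id => (PySem.List.pyRange 0 mult 1).foldl (fun acc _ => acc ++ [id]) acc) acc

-- the while loop; Python keeps end_id = start_id - 4 at every test, so end_id is
-- recomputed from start_id exactly as the Python reassignments do
def pvWhileA (start_id multiplier : Int) (result_list : List Int) : Int × Int × List Int :=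
  let end_id := start_id - 4
  if h : end_id > 0 then
    let result_list := pvBlockA start_id end_id multiplier result_list
    let multiplier := if multiplier > 2 then multiplier - 2 else multiplier
    pvWhileA (start_id - 4) multiplier result_list
  else (start_id, multiplier, result_list)
termination_by start_id.toNat
decreasing_by simp only [end_id] at h; omega

-- the code after the while loop: 'if start_id > 0: for id in range(start_id,0,-1): ...'
def pvTailA : Int × Int × List Int → List Int
  | (start_id, multiplier, result_list) =>
    if start_id > 0 then pvBlockA start_id 0 multiplier result_list
    else result_list

def get_random_video_id (max_id : Int) : List Int :=
  let start_id := max_id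
  let result_list : List Int := []
  let multiplier : Int := 8
  pvTailA (pvWhileA start_id multiplier result_list)

-- ===== PORT B =====
def get_random_video_id_alt (max_id : Int) : List Int :=
  (PySem.List.pyRange max_id 0 (-1)).foldl
    (fun result_list id =>
      result_list ++
        List.replicate (max (8 - 2 * PySem.Int.floordiv (max_id - id) 4) 2).toNat id)
    []

-- ===== PRECONDITION & SPEC =====
def Spec_get_random_video_id (max_id : Int) (out : List Int) : Prop := out = get_random_video_id_alt max_id
instance (max_id : Int) (out : List Int) : Decidable (Spec_get_random_video_id max_id out) := by unfold Spec_get_random_video_id; infer_instance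

-- ===== CLAIM (what is proved, stated in full; the proofs are below) =====
def Claim_equal_get_random_video_id : Prop := ∀ (max_id : Int), Dom_get_random_video_id max_id → Spec_get_random_video_id max_id (get_random_video_id max_id)

-- ===== LEMMAS AND PROOFS =====

-- common closed form: ids from `start` down to 1, each repeated max (mult - 2*block) 2 times
def pvSegs (start mult : Int) : List Int :=
  (PySem.List.pyRange start 0 (-1)).flatMap
    (fun id => List.replicate (max (mult - 2 * PySem.Int.floordiv (start - id) 4) 2).toNat id)

theorem pvFoldlConstAppend (l : List Int) (id : Int) (acc : List Int) :
    l.foldl (fun a _ => a ++ [id]) acc = acc ++ List.replicate l.length id := by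
  induction l generalizing acc with
  | nil => simp
  | cons x t ih => simp [List.foldl_cons, ih, List.replicate_succ]

theorem pvFoldlCongr {α β : Type} (l : List α) {f g : β → α → β} {init : β}
    (h : ∀ b x, x ∈ l → f b x = g b x) : l.foldl f init = l.foldl g init := by
  induction l generalizing init with
  | nil => rfl
  | cons x t ih =>
    simp only [List.foldl_cons, h init x (by simp)]
    exact ih (fun b y hy => h b y (by simp [hy]))

theorem pvBlockA_eq (s e mult : Int) (acc : List Int) :
    pvBlockA s e mult acc =
      acc ++ (PySem.List.pyRange s e (-1)).flatMap (fun id => List.replicate mult.toNat id) := by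
  unfold pvBlockA
  have h : ∀ (a : List Int) (id : Int),
      (PySem.List.pyRange 0 mult 1).foldl (fun acc _ => acc ++ [id]) a =
        a ++ List.replicate mult.toNat id := by
    intro a id
    rw [pvFoldlConstAppend, PySem.List.length_pyRange_one]
    simp
  calc (PySem.List.pyRange s e (-1)).foldl
        (fun acc id => (PySem.List.pyRange 0 mult 1).foldl (fun acc _ => acc ++ [id]) acc) acc
      = (PySem.List.pyRange s e (-1)).foldl
        (fun acc id => acc ++ List.replicate mult.toNat id) acc := by
        apply pvFoldlCongr; intro a x _; exact h a x
    _ = acc ++ (PySem.List.pyRange s e (-1)).flatMap (fun id => List.replicate mult.toNat id) :=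
        PySem.List.foldl_append_eq_flatMap _ _ _

theorem pvFlatMapCongr {α β : Type} (l : List α) (f g : α → List β)
    (h : ∀ x ∈ l, f x = g x) : l.flatMap f = l.flatMap g := by
  induction l with
  | nil => rfl
  | cons x t ih =>
    simp only [List.flatMap_cons, h x (by simp), ih (fun y hy => h y (by simp [hy]))]

theorem pvRangeNegAppend (a m b : Int) (h1 : b ≤ m) (h2 : m ≤ a) :
    PySem.List.pyRange a b (-1) = PySem.List.pyRange a m (-1) ++ PySem.List.pyRange m b (-1) := by
  rw [PySem.List.pyRange_neg_one_eq_reverse,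
      PySem.List.pyRange_one_append (b + 1) (m + 1) (a + 1) (by omega) (by omega),
      List.reverse_append, ← PySem.List.pyRange_neg_one_eq_reverse,
      ← PySem.List.pyRange_neg_one_eq_reverse]

theorem pvFd4 (x : Int) : PySem.Int.floordiv x 4 = x / 4 :=
  PySem.Int.floordiv_eq_ediv_of_pos (by norm_num)

-- the first block of four ids carries exactly `mult`
theorem pvSegs_split (start mult : Int) (hs : 4 < start) (hm : 2 ≤ mult) :
    pvSegs start mult =
      (PySem.List.pyRange start (start - 4) (-1)).flatMap (fun id => List.replicate mult.toNat id)
        ++ pvSegs (start - 4) (if mult > 2 then mult - 2 else mult) := by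
  unfold pvSegs
  rw [pvRangeNegAppend start (start - 4) 0 (by omega) (by omega), List.flatMap_append]
  congr 1
  · apply pvFlatMapCongr
    intro id hid
    rw [PySem.List.mem_pyRange_neg_one] at hid
    rw [pvFd4]
    have : (start - id) / 4 = 0 := by omega
    rw [this]
    have hmax : (max (mult - 2 * 0) 2).toNat = mult.toNat := by omega
    rw [hmax]
  · apply pvFlatMapCongr
    intro id hid
    rw [PySem.List.mem_pyRange_neg_one] at hid
    rw [pvFd4, pvFd4]
    have hq : (start - id) / 4 = (start - 4 - id) / 4 + 1 := by omega
    have hq0 : 0 ≤ (start - 4 - id) / 4 := by omega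
    rw [hq]
    split_ifs with h
    · have hmax : (max (mult - 2 * ((start - 4 - id) / 4 + 1)) 2).toNat
          = (max (mult - 2 - 2 * ((start - 4 - id) / 4)) 2).toNat := by omega
      rw [hmax]
    · have hmax : (max (mult - 2 * ((start - 4 - id) / 4 + 1)) 2).toNat
          = (max (mult - 2 * ((start - 4 - id) / 4)) 2).toNat := by omega
      rw [hmax]

theorem pvWhileA_spec (n : Nat) : ∀ (start mult : Int) (acc : List Int), start.toNat ≤ n →
    2 ≤ mult → mult % 2 = 0 → pvTailA (pvWhileA start mult acc) = acc ++ pvSegs start mult := by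
  induction n using Nat.strong_induction_on with
  | _ n ih =>
    intro start mult acc hn hm he
    rw [pvWhileA]
    dsimp only
    by_cases h : start - 4 > 0
    · rw [dif_pos h]
      have hm' : 2 ≤ (if mult > 2 then mult - 2 else mult) := by split_ifs <;> omega
      have he' : (if mult > 2 then mult - 2 else mult) % 2 = 0 := by split_ifs <;> omega
      have hlt : (start - 4).toNat < n := by omega
      rw [ih (start - 4).toNat hlt (start - 4) _ _ (le_refl _) hm' he']
      rw [pvBlockA_eq, List.append_assoc, pvSegs_split start mult (by omega) hm]
    · rw [dif_neg h]
      show (if start > 0 then pvBlockA start 0 mult acc else acc) = acc ++ pvSegs start mult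
      by_cases hp : start > 0
      · rw [if_pos hp, pvBlockA_eq]
        congr 1
        unfold pvSegs
        apply (pvFlatMapCongr _ _ _ ?_).symm
        intro id hid
        rw [PySem.List.mem_pyRange_neg_one] at hid
        rw [pvFd4]
        have h0 : (start - id) / 4 = 0 := by omega
        rw [h0]
        have hmax : (max (mult - 2 * 0) 2).toNat = mult.toNat := by omega
        rw [hmax]
      · rw [if_neg hp]
        unfold pvSegs
        rw [PySem.List.pyRange_neg_one_eq_nil (by omega)]
        simp

theorem pvAltEq (max_id : Int) : get_random_video_id_alt max_id = pvSegs max_id 8 := by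
  unfold get_random_video_id_alt pvSegs
  exact PySem.List.foldl_append_eq_flatMap _ _ _

-- ===== VERDICT (by name: the statement is the Claim_ definition above) =====
theorem get_random_video_id_spec : Claim_equal_get_random_video_id := by
  intro max_id _
  unfold Spec_get_random_video_id
  rw [pvAltEq]
  show pvTailA (pvWhileA max_id 8 []) = pvSegs max_id 8
  rw [pvWhileA_spec max_id.toNat max_id 8 [] (le_refl _) (by norm_num) (by norm_num)]
  simp
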